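-- pv_equiv track=rewrite | github.com/miethe/skillmeat | scripts/code_map/coverage_summary.py | _hook_api_buckets
-- ===== SOURCE A (Python) =====
-- from typing import Any, Dict, List, Tuple
--
-- def _hook_api_buckets(
--     nodes: List[Dict[str, Any]],
--     edges: List[Dict[str, Any]],
-- ) -> Dict[str, List[str]]:
--     hook_ids = {node["id"] for node in nodes if node.get("type") == "hook"}
--     calls_api = {edge["from"] for edge in edges if edge.get("type") == "calls_api"}
--     calls_client = {
--         edge["from"] for edge in edges if edge.get("type") == "hook_calls_api_client"
--     }
--
--     direct_only = sorted(calls_api - calls_client)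
--     client_only = sorted(calls_client - calls_api)
--     both = sorted(calls_api & calls_client)
--     without_api = sorted(hook_ids - calls_api - calls_client)
--
--     return {
--         "hooks_api_client_only": client_only,
--         "hooks_direct_api_only": direct_only,
--         "hooks_with_both": both,
--         "hooks_without_api": without_api,
--     }
-- ===== SOURCE B (Python) =====
-- from typing import Any, Dict, List
--
--
-- def _hook_api_buckets(
--     nodes: List[Dict[str, Any]],
--     edges: List[Dict[str, Any]],
-- ) -> Dict[str, List[str]]:
--     # One pass over edges: bitmask per source id (1 = calls_api, 2 = hook_calls_api_client).
--     flags = {}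
--     for edge in edges:
--         t = edge.get("type")
--         if t == "calls_api":
--             flags[edge["from"]] = flags.get(edge["from"], 0) | 1
--         elif t == "hook_calls_api_client":
--             flags[edge["from"]] = flags.get(edge["from"], 0) | 2
--     hook_ids = {node["id"] for node in nodes if node.get("type") == "hook"}
--     return {
--         "hooks_api_client_only": sorted(k for k, f in flags.items() if f == 2),
--         "hooks_direct_api_only": sorted(k for k, f in flags.items() if f == 1),
--         "hooks_with_both": sorted(k for k, f in flags.items() if f == 3),
--         "hooks_without_api": sorted(h for h in hook_ids if h not in flags),
--     }
-- ===== Notes on version B (the rewrite author's own statement) =====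
-- stated objective: alternative
-- what changed: Replaces the three separate set comprehensions and the set-algebra (difference/intersection) of A by a single pass over edges that accumulates a per-id bitmask dict, from which the four buckets are read off directly.
import Mathlib
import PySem

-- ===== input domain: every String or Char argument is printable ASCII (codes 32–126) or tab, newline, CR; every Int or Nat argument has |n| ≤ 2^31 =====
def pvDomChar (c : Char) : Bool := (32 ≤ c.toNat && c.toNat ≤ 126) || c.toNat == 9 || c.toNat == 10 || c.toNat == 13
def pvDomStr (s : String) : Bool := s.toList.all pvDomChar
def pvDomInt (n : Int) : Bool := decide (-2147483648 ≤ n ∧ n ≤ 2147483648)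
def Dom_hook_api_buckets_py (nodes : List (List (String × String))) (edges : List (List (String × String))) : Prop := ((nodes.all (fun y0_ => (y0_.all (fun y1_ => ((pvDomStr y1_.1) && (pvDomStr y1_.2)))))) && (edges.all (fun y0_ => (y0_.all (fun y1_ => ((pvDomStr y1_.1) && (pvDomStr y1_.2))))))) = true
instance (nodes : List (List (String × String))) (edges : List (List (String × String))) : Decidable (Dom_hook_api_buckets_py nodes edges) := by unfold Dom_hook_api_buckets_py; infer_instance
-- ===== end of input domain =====

-- B replaces A's three set comprehensions plus set algebra by one pass over edges accumulating
-- a per-id bitmask dict, from which the four sorted buckets are read off; same cost, different shape.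

-- shared input decoding: d[k] / d.get(k) on a Python dict given as a pair list
def pvDictGet (d : List (String × String)) (k : String) : Option String :=
  (PySem.Dict.ofList d).get? k

-- ===== PORT A =====
def hook_api_buckets_py (nodes : List (List (String × String))) (edges : List (List (String × String))) : List (String × List String) :=
  let hook_ids : PySem.Set String :=
    PySem.Set.ofList ((nodes.filter (fun n => pvDictGet n "type" == some "hook")).map
      (fun n => (pvDictGet n "id").getD ""))
  let calls_api : PySem.Set String :=
    PySem.Set.ofList ((edges.filter (fun e => pvDictGet e "type" == some "calls_api")).map
      (fun e => (pvDictGet e "from").getD ""))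
  let calls_client : PySem.Set String :=
    PySem.Set.ofList ((edges.filter (fun e => pvDictGet e "type" == some "hook_calls_api_client")).map
      (fun e => (pvDictGet e "from").getD ""))
  let direct_only := PySem.List.sorted (PySem.Set.diff calls_api calls_client) (fun x => x)
  let client_only := PySem.List.sorted (PySem.Set.diff calls_client calls_api) (fun x => x)
  let both := PySem.List.sorted (PySem.Set.inter calls_api calls_client) (fun x => x)
  let without_api := PySem.List.sorted (PySem.Set.diff (PySem.Set.diff hook_ids calls_api) calls_client) (fun x => x)
  [("hooks_api_client_only", client_only),
   ("hooks_direct_api_only", direct_only),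
   ("hooks_with_both", both),
   ("hooks_without_api", without_api)]

-- ===== PORT B =====
def hook_api_buckets_py_alt (nodes : List (List (String × String))) (edges : List (List (String × String))) : List (String × List String) :=
  let flags : PySem.Dict String Int :=
    edges.foldl (fun d e =>
      let t := pvDictGet e "type"
      if t == some "calls_api" then
        d.modify ((pvDictGet e "from").getD "") 0 (fun v => PySem.Int.bor v 1)
      else if t == some "hook_calls_api_client" then
        d.modify ((pvDictGet e "from").getD "") 0 (fun v => PySem.Int.bor v 2)
      else d) PySem.Dict.empty
  let hook_ids : PySem.Set String :=
    PySem.Set.ofList ((nodes.filter (fun n => pvDictGet n "type" == some "hook")).map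
      (fun n => (pvDictGet n "id").getD ""))
  [("hooks_api_client_only", PySem.List.sorted ((flags.items.filter (fun p => p.2 == 2)).map (·.1)) (fun x => x)),
   ("hooks_direct_api_only", PySem.List.sorted ((flags.items.filter (fun p => p.2 == 1)).map (·.1)) (fun x => x)),
   ("hooks_with_both", PySem.List.sorted ((flags.items.filter (fun p => p.2 == 3)).map (·.1)) (fun x => x)),
   ("hooks_without_api", PySem.List.sorted (hook_ids.filter (fun h => !(flags.contains h))) (fun x => x))]

-- ===== PRECONDITION & SPEC =====
-- Pre_ excludes exactly the inputs where the Python raises KeyError: a node of type "hook"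
-- without an "id" key, or an edge of one of the two interesting types without a "from" key.
def Pre_hook_api_buckets_py (nodes : List (List (String × String))) (edges : List (List (String × String))) : Prop :=
  (∀ n ∈ nodes, pvDictGet n "type" = some "hook" → (pvDictGet n "id").isSome = true) ∧
  (∀ e ∈ edges, (pvDictGet e "type" = some "calls_api" ∨ pvDictGet e "type" = some "hook_calls_api_client") →
    (pvDictGet e "from").isSome = true)
instance (nodes : List (List (String × String))) (edges : List (List (String × String))) : Decidable (Pre_hook_api_buckets_py nodes edges) := by unfold Pre_hook_api_buckets_py; infer_instance

def pvWitness_hook_api_buckets_py : (List (List (String × String))) × (List (List (String × String))) :=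
  ([[("type", "hook"), ("id", "h1")], [("type", "hook"), ("id", "h2")]],
   [[("type", "calls_api"), ("from", "h1")], [("type", "hook_calls_api_client"), ("from", "h1")]])

def Spec_hook_api_buckets_py (nodes : List (List (String × String))) (edges : List (List (String × String))) (out : List (String × List String)) : Prop := out = hook_api_buckets_py_alt nodes edges
instance (nodes : List (List (String × String))) (edges : List (List (String × String))) (out : List (String × List String)) : Decidable (Spec_hook_api_buckets_py nodes edges out) := by unfold Spec_hook_api_buckets_py; infer_instance

-- ===== CLAIM (what is proved, stated in full; the proofs are below) =====
def Claim_equal_hook_api_buckets_py : Prop := ∀ (nodes : List (List (String × String))) (edges : List (List (String × String))), Dom_hook_api_buckets_py nodes edges → Pre_hook_api_buckets_py nodes edges → Spec_hook_api_buckets_py nodes edges (hook_api_buckets_py nodes edges)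

-- ===== LEMMAS AND PROOFS =====

-- abbreviations for the edge fields used by both ports
def pvFrm (e : List (String × String)) : String := (pvDictGet e "from").getD ""
def pvIsApi (e : List (String × String)) : Bool := pvDictGet e "type" == some "calls_api"
def pvIsCli (e : List (String × String)) : Bool := pvDictGet e "type" == some "hook_calls_api_client"
def pvApiB (edges : List (List (String × String))) (k : String) : Bool :=
  edges.any (fun e => pvIsApi e && pvFrm e == k)
def pvCliB (edges : List (List (String × String))) (k : String) : Bool :=
  edges.any (fun e => pvIsCli e && pvFrm e == k)
def pvEnc (a c : Bool) : Int := (if a then 1 else 0) + (if c then 2 else 0)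
def pvStep (d : PySem.Dict String Int) (e : List (String × String)) : PySem.Dict String Int :=
  if pvIsApi e then d.modify (pvFrm e) 0 (fun v => PySem.Int.bor v 1)
  else if pvIsCli e then d.modify (pvFrm e) 0 (fun v => PySem.Int.bor v 2)
  else d

lemma pvBor1 (a c : Bool) : PySem.Int.bor (pvEnc a c) 1 = pvEnc true c := by
  cases a <;> cases c <;> decide

lemma pvBor2 (a c : Bool) : PySem.Int.bor (pvEnc a c) 2 = pvEnc a true := by
  cases a <;> cases c <;> decide

lemma pvNotCliOfApi (e : List (String × String)) (h : pvIsApi e = true) : pvIsCli e = false := by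
  simp only [pvIsApi, beq_iff_eq] at h
  simp [pvIsCli, h]

lemma pvNodupModify (d : PySem.Dict String Int) (k : String) (d0 : Int) (f : Int → Int)
    (hnd : d.keys.Nodup) : (d.modify k d0 f).keys.Nodup := by
  rw [PySem.Dict.keys_modify]
  by_cases hco : d.contains k = true
  · rw [PySem.Dict.keys_insert_of_contains _ _ hco]; exact hnd
  · rw [PySem.Dict.keys_insert_of_not_contains _ _ (by simpa using hco)]
    have : k ∉ d.keys := fun hm => hco ((PySem.Dict.contains_iff_mem_keys d k).mpr hm)
    simp [List.nodup_append, hnd]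
    exact fun a ha he => this (he ▸ ha)

-- the single-pass fold of B, characterized against the membership predicates
lemma pvFlagsInv (l : List (List (String × String))) (A C : String → Bool) (d : PySem.Dict String Int)
    (hnd : d.keys.Nodup)
    (hg : ∀ k, d.getD k 0 = pvEnc (A k) (C k))
    (hc : ∀ k, d.contains k = (A k || C k)) :
    (l.foldl pvStep d).keys.Nodup ∧
    (∀ k, (l.foldl pvStep d).getD k 0 = pvEnc (A k || pvApiB l k) (C k || pvCliB l k)) ∧
    (∀ k, (l.foldl pvStep d).contains k = ((A k || pvApiB l k) || (C k || pvCliB l k))) := by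
  induction l generalizing A C d with
  | nil =>
    refine ⟨hnd, ?_, ?_⟩ <;> intro k <;> simp [pvApiB, pvCliB, hg, hc]
  | cons e t ih =>
    simp only [List.foldl_cons]
    by_cases hA : pvIsApi e = true
    · have hCf : pvIsCli e = false := pvNotCliOfApi e hA
      have hstep : pvStep d e = d.modify (pvFrm e) 0 (fun v => PySem.Int.bor v 1) := by
        simp [pvStep, hA]
      rw [hstep]
      have h := ih (fun k => A k || (pvFrm e == k)) C
        (d.modify (pvFrm e) 0 (fun v => PySem.Int.bor v 1))
        (pvNodupModify d _ _ _ hnd)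
        (by
          intro k
          rw [PySem.Dict.getD_modify]
          by_cases hk : k = pvFrm e
          · subst hk; simp [hg, pvBor1]
          · have h2 : (pvFrm e == k) = false := by simpa using fun h => hk h.symm
            simp [hk, hg, h2])
        (by
          intro k
          rw [PySem.Dict.contains_modify]
          by_cases hk : k = pvFrm e
          · subst hk; simp
          · have h1 : (k == pvFrm e) = false := by simpa using hk
            have h2 : (pvFrm e == k) = false := by simpa using fun h => hk h.symm
            simp [h1, h2, hc])
      obtain ⟨h1, h2, h3⟩ := h
      have hA2 : ∀ k, ((A k || (pvFrm e == k)) || pvApiB t k) = (A k || pvApiB (e :: t) k) := by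
        intro k; simp [pvApiB, hA, Bool.or_assoc]
      have hC2 : ∀ k, (C k || pvCliB t k) = (C k || pvCliB (e :: t) k) := by
        intro k; simp [pvCliB, hCf]
      exact ⟨h1, fun k => by rw [h2 k, hA2 k, hC2 k], fun k => by rw [h3 k, hA2 k, hC2 k]⟩
    · by_cases hB : pvIsCli e = true
      · have hstep : pvStep d e = d.modify (pvFrm e) 0 (fun v => PySem.Int.bor v 2) := by
          simp [pvStep, hA, hB]
        rw [hstep]
        have h := ih A (fun k => C k || (pvFrm e == k))
          (d.modify (pvFrm e) 0 (fun v => PySem.Int.bor v 2))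
          (pvNodupModify d _ _ _ hnd)
          (by
            intro k
            rw [PySem.Dict.getD_modify]
            by_cases hk : k = pvFrm e
            · subst hk; simp [hg, pvBor2]
            · have h2 : (pvFrm e == k) = false := by simpa using fun h => hk h.symm
              simp [hk, hg, h2])
          (by
            intro k
            rw [PySem.Dict.contains_modify]
            by_cases hk : k = pvFrm e
            · subst hk; simp [hc, Bool.or_comm]
            · have h1 : (k == pvFrm e) = false := by simpa using hk
              have h2 : (pvFrm e == k) = false := by simpa using fun h => hk h.symm
              simp [h1, h2, hc])
        obtain ⟨h1, h2, h3⟩ := h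
        have hA2 : ∀ k, (A k || pvApiB t k) = (A k || pvApiB (e :: t) k) := by
          intro k; simp [pvApiB, hA]
        have hC2 : ∀ k, ((C k || (pvFrm e == k)) || pvCliB t k) = (C k || pvCliB (e :: t) k) := by
          intro k; simp [pvCliB, hB, Bool.or_assoc]
        exact ⟨h1, fun k => by rw [h2 k, hA2 k, hC2 k], fun k => by rw [h3 k, hA2 k, hC2 k]⟩
      · have hstep : pvStep d e = d := by simp [pvStep, hA, hB]
        rw [hstep]
        have h := ih A C d hnd hg hc
        obtain ⟨h1, h2, h3⟩ := h
        have hA2 : ∀ k, pvApiB t k = pvApiB (e :: t) k := by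
          intro k; simp [pvApiB, hA]
        have hC2 : ∀ k, pvCliB t k = pvCliB (e :: t) k := by
          intro k; simp [pvCliB, hB]
        exact ⟨h1, fun k => by rw [h2 k, hA2 k, hC2 k], fun k => by rw [h3 k, hA2 k, hC2 k]⟩

lemma pvGetSomeIff (d : PySem.Dict String Int) (x : String) (c : Int) :
    d.get? x = some c ↔ (d.contains x = true ∧ d.getD x 0 = c) := by
  constructor
  · intro h
    refine ⟨?_, ?_⟩
    · rw [PySem.Dict.contains_eq_isSome_get?, h]; rfl
    · rw [PySem.Dict.getD_eq_get?_getD, h]; rfl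
  · rintro ⟨hc, hd⟩
    rw [PySem.Dict.contains_eq_isSome_get?] at hc
    obtain ⟨v, hv⟩ := Option.isSome_iff_exists.mp hc
    rw [PySem.Dict.getD_eq_get?_getD, hv] at hd
    rw [hv]; simpa using hd

-- membership in a bucket list of B
lemma pvMemBucket (d : PySem.Dict String Int) (hnd : d.keys.Nodup) (c : Int) (x : String) :
    x ∈ (d.items.filter (fun p => p.2 == c)).map (·.1) ↔ d.get? x = some c := by
  rw [PySem.Dict.get?_eq_some_iff_mem_items d x c hnd]
  simp only [List.mem_map, List.mem_filter, beq_iff_eq]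
  constructor
  · rintro ⟨p, ⟨hp, hc⟩, hx⟩
    have : p = (x, c) := by
      cases p; simp at hc hx; simp [hc, hx]
    rwa [this] at hp
  · intro h
    exact ⟨(x, c), ⟨h, rfl⟩, rfl⟩

lemma pvNodupBucket (d : PySem.Dict String Int) (hnd : d.keys.Nodup) (c : Int) :
    ((d.items.filter (fun p => p.2 == c)).map (·.1)).Nodup := by
  have hsub : ((d.items.filter (fun p => p.2 == c)).map (·.1)).Sublist (d.items.map (·.1)) :=
    List.Sublist.map (fun p : String × Int => p.1) List.filter_sublist
  exact hsub.nodup (by simpa [PySem.Dict.keys] using hnd)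

-- membership in A's comprehension sets
lemma pvMemApi (edges : List (List (String × String))) (x : String) :
    x ∈ PySem.Set.ofList ((edges.filter (fun e => pvDictGet e "type" == some "calls_api")).map
      (fun e => (pvDictGet e "from").getD "")) ↔ pvApiB edges x = true := by
  simp only [PySem.Set.mem_ofList, List.mem_map, List.mem_filter, pvApiB, List.any_eq_true,
    pvIsApi, pvFrm, Bool.and_eq_true, beq_iff_eq]
  exact ⟨fun ⟨e, ⟨he, ht⟩, hf⟩ => ⟨e, he, ht, hf⟩, fun ⟨e, he, ht, hf⟩ => ⟨e, ⟨he, ht⟩, hf⟩⟩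

lemma pvMemCli (edges : List (List (String × String))) (x : String) :
    x ∈ PySem.Set.ofList ((edges.filter (fun e => pvDictGet e "type" == some "hook_calls_api_client")).map
      (fun e => (pvDictGet e "from").getD "")) ↔ pvCliB edges x = true := by
  simp only [PySem.Set.mem_ofList, List.mem_map, List.mem_filter, pvCliB, List.any_eq_true,
    pvIsCli, pvFrm, Bool.and_eq_true, beq_iff_eq]
  exact ⟨fun ⟨e, ⟨he, ht⟩, hf⟩ => ⟨e, he, ht, hf⟩, fun ⟨e, he, ht, hf⟩ => ⟨e, ⟨he, ht⟩, hf⟩⟩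

-- ===== VERDICT (by name: the statement is the Claim_ definition above) =====
theorem hook_api_buckets_py_spec : Claim_equal_hook_api_buckets_py := by
  intro nodes edges _ _
  unfold Spec_hook_api_buckets_py hook_api_buckets_py hook_api_buckets_py_alt
  have hfold : (edges.foldl (fun d e =>
      let t := pvDictGet e "type"
      if t == some "calls_api" then
        d.modify ((pvDictGet e "from").getD "") 0 (fun v => PySem.Int.bor v 1)
      else if t == some "hook_calls_api_client" then
        d.modify ((pvDictGet e "from").getD "") 0 (fun v => PySem.Int.bor v 2)
      else d) PySem.Dict.empty) = edges.foldl pvStep PySem.Dict.empty := rfl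
  rw [hfold]
  dsimp only
  obtain ⟨hndF, hgF, hcF⟩ := pvFlagsInv edges (fun _ => false) (fun _ => false) PySem.Dict.empty
    PySem.Dict.nodup_keys_empty
    (by intro k; simp [pvEnc, PySem.Dict.getD_empty])
    (by intro k; simp [PySem.Dict.contains_empty])
  simp only [Bool.false_or] at hgF hcF
  have hid : Function.Injective (fun x : String => x) := fun a b h => h
  have hbucket : ∀ (c : Int) (x : String),
      x ∈ ((edges.foldl pvStep PySem.Dict.empty).items.filter (fun p => p.2 == c)).map (·.1) ↔
        ((pvApiB edges x || pvCliB edges x) = true ∧ pvEnc (pvApiB edges x) (pvCliB edges x) = c) := by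
    intro c x
    rw [pvMemBucket _ hndF, pvGetSomeIff, hgF, hcF]
  have h1 : PySem.List.sorted
      (PySem.Set.diff
        (PySem.Set.ofList ((edges.filter (fun e => pvDictGet e "type" == some "hook_calls_api_client")).map
          (fun e => (pvDictGet e "from").getD "")))
        (PySem.Set.ofList ((edges.filter (fun e => pvDictGet e "type" == some "calls_api")).map
          (fun e => (pvDictGet e "from").getD "")))) (fun x => x) =
      PySem.List.sorted (((edges.foldl pvStep PySem.Dict.empty).items.filter (fun p => p.2 == 2)).map (·.1)) (fun x => x) := by
    refine PySem.List.sorted_eq_sorted_of_perm _ _ _ hid ?_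
    refine (List.perm_ext_iff_of_nodup (PySem.Set.nodup_diff _ _ (PySem.Set.nodup_ofList _))
      (pvNodupBucket _ hndF 2)).mpr ?_
    intro x
    rw [PySem.Set.mem_diff, hbucket 2 x, pvMemApi, pvMemCli]
    cases ha : pvApiB edges x <;> cases hb : pvCliB edges x <;> simp [pvEnc]
  have h2 : PySem.List.sorted
      (PySem.Set.diff
        (PySem.Set.ofList ((edges.filter (fun e => pvDictGet e "type" == some "calls_api")).map
          (fun e => (pvDictGet e "from").getD "")))
        (PySem.Set.ofList ((edges.filter (fun e => pvDictGet e "type" == some "hook_calls_api_client")).map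
          (fun e => (pvDictGet e "from").getD "")))) (fun x => x) =
      PySem.List.sorted (((edges.foldl pvStep PySem.Dict.empty).items.filter (fun p => p.2 == 1)).map (·.1)) (fun x => x) := by
    refine PySem.List.sorted_eq_sorted_of_perm _ _ _ hid ?_
    refine (List.perm_ext_iff_of_nodup (PySem.Set.nodup_diff _ _ (PySem.Set.nodup_ofList _))
      (pvNodupBucket _ hndF 1)).mpr ?_
    intro x
    rw [PySem.Set.mem_diff, hbucket 1 x, pvMemApi, pvMemCli]
    cases ha : pvApiB edges x <;> cases hb : pvCliB edges x <;> simp [pvEnc]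
  have h3 : PySem.List.sorted
      (PySem.Set.inter
        (PySem.Set.ofList ((edges.filter (fun e => pvDictGet e "type" == some "calls_api")).map
          (fun e => (pvDictGet e "from").getD "")))
        (PySem.Set.ofList ((edges.filter (fun e => pvDictGet e "type" == some "hook_calls_api_client")).map
          (fun e => (pvDictGet e "from").getD "")))) (fun x => x) =
      PySem.List.sorted (((edges.foldl pvStep PySem.Dict.empty).items.filter (fun p => p.2 == 3)).map (·.1)) (fun x => x) := by
    refine PySem.List.sorted_eq_sorted_of_perm _ _ _ hid ?_
    refine (List.perm_ext_iff_of_nodup (PySem.Set.nodup_inter _ _ (PySem.Set.nodup_ofList _))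
      (pvNodupBucket _ hndF 3)).mpr ?_
    intro x
    rw [PySem.Set.mem_inter, hbucket 3 x, pvMemApi, pvMemCli]
    cases ha : pvApiB edges x <;> cases hb : pvCliB edges x <;> simp [pvEnc]
  have h4 : PySem.List.sorted
      (PySem.Set.diff
        (PySem.Set.diff
          (PySem.Set.ofList ((nodes.filter (fun n => pvDictGet n "type" == some "hook")).map
            (fun n => (pvDictGet n "id").getD "")))
          (PySem.Set.ofList ((edges.filter (fun e => pvDictGet e "type" == some "calls_api")).map
            (fun e => (pvDictGet e "from").getD ""))))
        (PySem.Set.ofList ((edges.filter (fun e => pvDictGet e "type" == some "hook_calls_api_client")).map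
          (fun e => (pvDictGet e "from").getD "")))) (fun x => x) =
      PySem.List.sorted
        ((PySem.Set.ofList ((nodes.filter (fun n => pvDictGet n "type" == some "hook")).map
            (fun n => (pvDictGet n "id").getD ""))).filter
          (fun h => !((edges.foldl pvStep PySem.Dict.empty).contains h))) (fun x => x) := by
    refine PySem.List.sorted_eq_sorted_of_perm _ _ _ hid ?_
    refine (List.perm_ext_iff_of_nodup
      (PySem.Set.nodup_diff _ _ (PySem.Set.nodup_diff _ _ (PySem.Set.nodup_ofList _)))
      ((PySem.Set.nodup_ofList _).filter _)).mpr ?_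
    intro x
    rw [PySem.Set.mem_diff, PySem.Set.mem_diff, List.mem_filter, pvMemApi, pvMemCli]
    simp only [hcF]
    cases pvApiB edges x <;> cases pvCliB edges x <;> simp
  rw [h1, h2, h3, h4]
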